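-- pv_equiv track=rewrite | github.com/AdrianPiacek/Python_Snippets | snippets.py | find_least_number_missing
-- ===== SOURCE A (Python) =====
-- import itertools
--
-- def check_number_bigger_by_1(a,b):
--     c = b - a
--     if c <= 1:
--         return False
--     elif c > 1:
--         return True
--
-- def check_sum_equals_number(input_list, number):
--     sum = 0
--     for i in range(len(input_list)):
--         for j in  input_list[i]:
--             sum += j
--         if number == sum:
--             return True
--         else:
--             sum = 0
--
--     return False
--
-- def check_if_number_is_sum(number, list_slice):
--     list_len = len(list_slice)
--     for i in range(list_len):
--         combinations = list(itertools.combinations(list_slice, i + 2)) # incerement by 2 because at least combination of 2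
--         if check_sum_equals_number(combinations, number) == True:
--             return True
--     return False
--
-- def find_least_number_missing(input_list):
--     input_list = sorted(input_list) # needs to be sorted
--     missing_number = - 1
--     index = 0
--     while index < len(input_list):
--         if check_number_bigger_by_1(input_list[index], input_list[index+1]) == True:
--             for i in range(1,input_list[index+1] - input_list[index]):
--                 missing_number = input_list[index] + i
--                 if check_if_number_is_sum(missing_number, input_list[0:index+1]) == False:
--                     return missing_number
--
--         index += 1
--     return missing_number
-- ===== SOURCE B (Python) =====
-- def find_least_number_missing(input_list):
--     s = sorted(input_list)
--     reach1 = set()  # sums of subsets of the processed prefix with >= 1 element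
--     reach2 = set()  # sums of subsets of the processed prefix with >= 2 elements
--     prev = None
--     for x in s:
--         if prev is not None and x - prev > 1:
--             for m in range(prev + 1, x):
--                 if m not in reach2:
--                     return m
--         new = {t + x for t in reach1}
--         reach2 |= new
--         reach1 |= new
--         reach1.add(x)
--         prev = x
--     return -1
-- ===== Notes on version B (the rewrite author's own statement) =====
-- stated objective: alternative
-- what changed: B replaces A's per-candidate enumeration of all combinations of every size (itertools.combinations inside a triple loop) with a single incremental subset-sum DP that maintains the sets of sums reachable with >=1 and >=2 elements of the growing sorted prefix.
-- crash fix: On every non-empty list whose every sorted-gap value is a >=2-element subset-sum of the preceding prefix (e.g. [1], [1,2,3], [1,2,4,8]) A raises IndexError on input_list[index+1] at the last index, while B returns -1 ('nothing is missing'). — e.g. on find_least_number_missing([1]): A raises IndexError, B returns -1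
import Mathlib
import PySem

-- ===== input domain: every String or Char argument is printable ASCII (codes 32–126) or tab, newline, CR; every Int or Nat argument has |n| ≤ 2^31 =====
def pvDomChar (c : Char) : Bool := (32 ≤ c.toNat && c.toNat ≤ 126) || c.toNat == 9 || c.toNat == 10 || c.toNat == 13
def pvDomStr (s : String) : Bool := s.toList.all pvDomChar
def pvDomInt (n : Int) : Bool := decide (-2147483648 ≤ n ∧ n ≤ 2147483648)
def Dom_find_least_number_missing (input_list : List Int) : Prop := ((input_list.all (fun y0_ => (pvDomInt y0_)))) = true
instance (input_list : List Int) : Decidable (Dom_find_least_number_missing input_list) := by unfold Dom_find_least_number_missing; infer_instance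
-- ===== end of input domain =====

-- B replaces A's per-candidate enumeration of all combinations with one incremental
-- subset-sum DP (reachable sums using ≥1 / ≥2 elements of the growing prefix); objective: alternative.

-- ===== PORT A =====
def check_number_bigger_by_1 (a b : Int) : Bool :=
  if b - a ≤ 1 then false else true

def check_sum_equals_number (input_list : List (List Int)) (number : Int) : Bool :=
  match input_list with
  | [] => false
  | c :: rest =>
    -- inner 'for j in input_list[i]: sum += j' is the fold below
    if number == c.foldl (· + ·) 0 then true else check_sum_equals_number rest number

def check_if_number_is_sum (number : Int) (list_slice : List Int) : Bool :=
  (List.range list_slice.length).any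
    (fun i => check_sum_equals_number (PySem.List.combinations list_slice (i + 2)) number)

-- A's inner 'for i in range(1, gap): … return missing_number' loop (some = early return;
-- range is a lazy iterator, ported as a counting loop: fuel = gap - 1 remaining steps)
def aScanGo (base : Int) (pfx : List Int) : Nat → Int → Option Int
  | 0, _ => none
  | fuel + 1, i =>
    if check_if_number_is_sum (base + i) pfx == false then some (base + i)
    else aScanGo base pfx fuel (i + 1)

-- A's while loop; at index = len-1 Python raises IndexError on input_list[index+1] (the
-- 'none => 0' branch, excluded by Pre_); the while exits normally only on the empty list,
-- where missing_number is still -1.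
def aLoop (s : List Int) (index : Nat) : Int :=
  if h : index < s.length then
    if h2 : index + 1 < s.length then
      if check_number_bigger_by_1 s[index] s[index + 1] = true then
        match aScanGo s[index] (s.take (index + 1)) (s[index + 1] - s[index] - 1).toNat 1 with
        | some m => m
        | none => aLoop s (index + 1)
      else aLoop s (index + 1)
    else 0
  else -1
termination_by s.length - index
decreasing_by all_goals omega

def find_least_number_missing (input_list : List Int) : Int :=
  aLoop (PySem.List.sorted input_list (fun x => x) false) 0

-- ===== PORT B =====
-- B's 'for m in range(prev+1, x): if m not in reach2: return m' (lazy range, counting loop)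
def altScanGo (r2 : PySem.Set Int) : Nat → Int → Option Int
  | 0, _ => none
  | fuel + 1, m => if PySem.Set.contains r2 m then altScanGo r2 fuel (m + 1) else some m

-- one DP step: new = {t+x for t in reach1}; reach2 |= new; reach1 |= new; reach1.add(x)
def altStep (r1 r2 : PySem.Set Int) (x : Int) : PySem.Set Int × PySem.Set Int :=
  let nw := PySem.Set.ofList (r1.map (fun t => t + x))
  (PySem.Set.add (PySem.Set.union r1 nw) x, PySem.Set.union r2 nw)

def altGo (r1 r2 : PySem.Set Int) (prev : Option Int) : List Int → Int
  | [] => -1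
  | x :: rest =>
    match prev with
    | some p =>
      if x - p > 1 then
        match altScanGo r2 (x - (p + 1)).toNat (p + 1) with
        | some m => m
        | none => altGo (altStep r1 r2 x).1 (altStep r1 r2 x).2 (some x) rest
      else altGo (altStep r1 r2 x).1 (altStep r1 r2 x).2 (some x) rest
    | none => altGo (altStep r1 r2 x).1 (altStep r1 r2 x).2 (some x) rest

def find_least_number_missing_alt (input_list : List Int) : Int :=
  altGo PySem.Set.empty PySem.Set.empty none (PySem.List.sorted input_list (fun x => x) false)

-- ===== PRECONDITION & SPEC =====
-- A raises IndexError (input_list[index+1] at the last index) on every NON-empty list whose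
-- every gap value is a ≥2-element subset-sum of the preceding prefix; Pre_ admits exactly the
-- inputs on which A returns: the empty list, or a sorted gap containing a non-subset-sum value.
-- the distinct ≥2-element subset-sums of s[0..i] (the prefix before the gap)
def gapSums (s : List Int) (i : Nat) : List Int :=
  PySem.Set.ofList (((s.take (i + 1)).sublists.filter (fun c => decide (2 ≤ c.length))).map
    (fun c => c.sum))

-- "some value of the open gap (s[i], s[i+1]) is not a ≥2-element subset-sum of s[0..i]",
-- stated by counting: fewer distinct such sums fall in the gap than the gap has integers.
def Pre_find_least_number_missing (input_list : List Int) : Prop :=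
  let s := PySem.List.sorted input_list (fun x => x) false
  input_list = [] ∨
    ∃ i ∈ List.range s.length, i + 1 < s.length ∧
      s.getD i 0 + 1 < s.getD (i + 1) 0 ∧
      (((gapSums s i).filter
          (fun v => decide (s.getD i 0 < v ∧ v < s.getD (i + 1) 0))).length : Int) <
        s.getD (i + 1) 0 - s.getD i 0 - 1

instance (input_list : List Int) : Decidable (Pre_find_least_number_missing input_list) := by
  unfold Pre_find_least_number_missing; infer_instance

def pvWitness_find_least_number_missing : List Int := [1, 3]

-- On every non-empty list all of whose gap values are ≥2-element subset-sums of the preceding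
-- prefix, A raises IndexError while B returns -1 ("nothing is missing").
def Raises_find_least_number_missing (input_list : List Int) : Prop :=
  let s := PySem.List.sorted input_list (fun x => x) false
  input_list ≠ [] ∧
    ¬ ∃ i ∈ List.range s.length, i + 1 < s.length ∧
        s.getD i 0 + 1 < s.getD (i + 1) 0 ∧
        (((gapSums s i).filter
            (fun v => decide (s.getD i 0 < v ∧ v < s.getD (i + 1) 0))).length : Int) <
          s.getD (i + 1) 0 - s.getD i 0 - 1

instance (input_list : List Int) : Decidable (Raises_find_least_number_missing input_list) := by
  unfold Raises_find_least_number_missing; infer_instance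

def pvRaiseWitness_find_least_number_missing : List Int := [1]
def pvRaiseWitnessOut_find_least_number_missing : Int := -1

def Spec_find_least_number_missing (input_list : List Int) (out : Int) : Prop := out = find_least_number_missing_alt input_list
instance (input_list : List Int) (out : Int) : Decidable (Spec_find_least_number_missing input_list out) := by unfold Spec_find_least_number_missing; infer_instance

-- ===== CLAIM (what is proved, stated in full; the proofs are below) =====
def Claim_equal_find_least_number_missing : Prop := ∀ (input_list : List Int), Dom_find_least_number_missing input_list → Pre_find_least_number_missing input_list → Spec_find_least_number_missing input_list (find_least_number_missing input_list)

def Claim_raises_find_least_number_missing : Prop := (∀ (input_list : List Int), Dom_find_least_number_missing input_list → Raises_find_least_number_missing input_list → ¬ Pre_find_least_number_missing input_list) ∧ (Dom_find_least_number_missing (pvRaiseWitness_find_least_number_missing) ∧ Raises_find_least_number_missing (pvRaiseWitness_find_least_number_missing) ∧ find_least_number_missing_alt (pvRaiseWitness_find_least_number_missing) = pvRaiseWitnessOut_find_least_number_missing)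

-- ===== LEMMAS AND PROOFS =====

theorem csum_iff (combos : List (List Int)) (number : Int) :
    check_sum_equals_number combos number = true ↔ ∃ c ∈ combos, c.sum = number := by
  induction combos with
  | nil => simp [check_sum_equals_number]
  | cons c rest ih =>
    simp only [check_sum_equals_number, List.mem_cons]
    rw [← List.sum_eq_foldl]
    by_cases h : number = c.sum
    · simp [h]
    · have : (number == c.sum) = false := by simp [h]
      rw [this]
      simp only [Bool.false_eq_true, if_false, ih]
      constructor
      · rintro ⟨d, hd, hs⟩; exact ⟨d, Or.inr hd, hs⟩
      · rintro ⟨d, (rfl | hd), hs⟩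
        · exact absurd hs.symm h
        · exact ⟨d, hd, hs⟩

theorem check_iff (number : Int) (pfx : List Int) :
    check_if_number_is_sum number pfx = true ↔
      ∃ c : List Int, c.Sublist pfx ∧ 2 ≤ c.length ∧ c.sum = number := by
  unfold check_if_number_is_sum
  simp only [List.any_eq_true, List.mem_range, csum_iff, PySem.List.mem_combinations_iff]
  constructor
  · rintro ⟨i, _, c, ⟨hsub, hlen⟩, hsum⟩
    exact ⟨c, hsub, by omega, hsum⟩
  · rintro ⟨c, hsub, hlen, hsum⟩
    have hle := hsub.length_le
    exact ⟨c.length - 2, by omega, c, ⟨hsub, by omega⟩, hsum⟩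

theorem sublist_concat_iff {c p : List Int} {x : Int} :
    c.Sublist (p ++ [x]) ↔ c.Sublist p ∨ ∃ c', c = c' ++ [x] ∧ c'.Sublist p := by
  constructor
  · intro h
    rcases List.sublist_append_iff.mp h with ⟨a, b, rfl, ha, hb⟩
    rcases List.sublist_singleton.mp hb with rfl | rfl
    · exact Or.inl (by simpa using ha)
    · exact Or.inr ⟨a, rfl, ha⟩
  · rintro (h | ⟨c', rfl, h⟩)
    · exact h.trans (List.sublist_append_left _ _)
    · exact h.append (List.Sublist.refl _)

-- invariants of B's DP sets
def Inv1 (r1 p : List Int) : Prop := ∀ v, v ∈ r1 ↔ ∃ c : List Int, c.Sublist p ∧ c ≠ [] ∧ c.sum = v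
def Inv2 (r2 p : List Int) : Prop := ∀ v, v ∈ r2 ↔ ∃ c : List Int, c.Sublist p ∧ 2 ≤ c.length ∧ c.sum = v

theorem step_inv (r1 r2 : PySem.Set Int) (p : List Int) (x : Int)
    (h1 : Inv1 r1 p) (h2 : Inv2 r2 p) :
    Inv1 (altStep r1 r2 x).1 (p ++ [x]) ∧ Inv2 (altStep r1 r2 x).2 (p ++ [x]) := by
  have hmem1 : ∀ v : Int, v ∈ (altStep r1 r2 x).1 ↔ v ∈ r1 ∨ (∃ t ∈ r1, t + x = v) ∨ v = x := by
    intro v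
    simp only [altStep, PySem.Set.mem_add, PySem.Set.mem_union, PySem.Set.mem_ofList,
      List.mem_map]
    rw [or_assoc]
  have hmem2 : ∀ v : Int, v ∈ (altStep r1 r2 x).2 ↔ v ∈ r2 ∨ (∃ t ∈ r1, t + x = v) := by
    intro v
    simp only [altStep, PySem.Set.mem_union, PySem.Set.mem_ofList, List.mem_map]
  constructor
  · intro v
    rw [hmem1]
    constructor
    · rintro (hv | ⟨t, ht, rfl⟩ | hx)
      · obtain ⟨c, hc, hne, hs⟩ := (h1 v).mp hv
        exact ⟨c, hc.trans (List.sublist_append_left _ _), hne, hs⟩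
      · obtain ⟨c, hc, hne, hs⟩ := (h1 t).mp ht
        exact ⟨c ++ [x], hc.append (List.Sublist.refl _), by simp, by simp [hs]⟩
      · subst hx
        exact ⟨[v], (List.sublist_append_right _ _), by simp, by simp⟩
    · rintro ⟨c, hc, hne, hs⟩
      rcases sublist_concat_iff.mp hc with hcp | ⟨c', rfl, hc'⟩
      · exact Or.inl ((h1 v).mpr ⟨c, hcp, hne, hs⟩)
      · rcases eq_or_ne c' [] with rfl | hne'
        · simp at hs; exact Or.inr (Or.inr hs.symm)
        · refine Or.inr (Or.inl ⟨c'.sum, (h1 c'.sum).mpr ⟨c', hc', hne', rfl⟩, ?_⟩)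
          simpa using hs
  · intro v
    rw [hmem2]
    constructor
    · rintro (hv | ⟨t, ht, rfl⟩)
      · obtain ⟨c, hc, hlen, hs⟩ := (h2 v).mp hv
        exact ⟨c, hc.trans (List.sublist_append_left _ _), hlen, hs⟩
      · obtain ⟨c, hc, hne, hs⟩ := (h1 t).mp ht
        have : 1 ≤ c.length := by
          cases c with
          | nil => simp at hne
          | cons a l => simp
        exact ⟨c ++ [x], hc.append (List.Sublist.refl _), by simp; omega, by simp [hs]⟩
    · rintro ⟨c, hc, hlen, hs⟩
      rcases sublist_concat_iff.mp hc with hcp | ⟨c', rfl, hc'⟩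
      · exact Or.inl ((h2 v).mpr ⟨c, hcp, hlen, hs⟩)
      · have hne' : c' ≠ [] := by
          intro h; subst h; simp at hlen
        refine Or.inr ⟨c'.sum, (h1 c'.sum).mpr ⟨c', hc', hne', rfl⟩, ?_⟩
        simpa using hs

theorem scan_eq (r2 : PySem.Set Int) (pfx : List Int) (h2 : Inv2 r2 pfx) (base : Int) :
    ∀ (fuel : Nat) (i : Int), aScanGo base pfx fuel i = altScanGo r2 fuel (base + i) := by
  intro fuel
  induction fuel with
  | zero => intro i; rfl
  | succ fuel ih =>
    intro i
    by_cases hc : (base + i) ∈ r2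
    · have hchk : check_if_number_is_sum (base + i) pfx = true :=
        (check_iff _ _).mpr ((h2 _).mp hc)
      have hrec := ih (i + 1)
      rw [show base + (i + 1) = base + i + 1 by ring] at hrec
      simp [aScanGo, altScanGo, hchk, hc, hrec]
    · have hchk : check_if_number_is_sum (base + i) pfx = false := by
        rw [Bool.eq_false_iff]
        intro h
        exact hc ((h2 _).mpr ((check_iff _ _).mp h))
      simp [aScanGo, altScanGo, hchk, hc]

theorem aScan_none (base : Int) (pfx : List Int) :
    ∀ (fuel : Nat) (i : Int), aScanGo base pfx fuel i = none →
      ∀ j : Int, i ≤ j → j < i + fuel → check_if_number_is_sum (base + j) pfx = true := by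
  intro fuel
  induction fuel with
  | zero => intro i _ j h1 h2; omega
  | succ fuel ih =>
    intro i h j h1 h2
    by_cases hchk : check_if_number_is_sum (base + i) pfx = false
    · simp [aScanGo, hchk] at h
    · have hi : check_if_number_is_sum (base + i) pfx = true := by
        cases hc : check_if_number_is_sum (base + i) pfx
        · exact absurd hc hchk
        · rfl
      rcases eq_or_lt_of_le h1 with rfl | hlt
      · exact hi
      · have h' : aScanGo base pfx fuel (i + 1) = none := by
          simpa [aScanGo, hi] using h
        exact ih (i + 1) h' j (by omega) (by omega)

def HitFrom (s : List Int) (j : Nat) : Prop :=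
  ∃ i, j ≤ i ∧ i + 1 < s.length ∧
    s.getD i 0 + 1 < s.getD (i + 1) 0 ∧
    ∃ m ∈ PySem.List.pyRange (s.getD i 0 + 1) (s.getD (i + 1) 0) 1,
      ∀ c ∈ (s.take (i + 1)).sublists, 2 ≤ c.length → c.sum ≠ m

theorem loop_eq (n : Nat) : ∀ (s : List Int) (j : Nat) (r1 r2 : PySem.Set Int),
    s.length - j = n → j < s.length →
    Inv1 r1 (s.take (j + 1)) → Inv2 r2 (s.take (j + 1)) →
    HitFrom s j →
    aLoop s j = altGo r1 r2 (some (s.getD j 0)) (s.drop (j + 1)) := by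
  induction n using Nat.strong_induction_on with
  | _ n ihn =>
  intro s j r1 r2 hn hj h1 h2 hhit
  obtain ⟨i, hji, hi1, hgap, m, hm, hmiss⟩ := hhit
  have hj1 : j + 1 < s.length := by omega
  set p := s.getD j 0 with hp
  set x := s.getD (j + 1) 0 with hx
  have hpj : s[j] = p := (List.getD_eq_getElem s 0 hj).symm
  have hxj : s[j + 1] = x := (List.getD_eq_getElem s 0 hj1).symm
  have hxq : s[j + 1]? = some x := by
    rw [List.getElem?_eq_getElem hj1, hxj]
  have hdrop : s.drop (j + 1) = x :: s.drop (j + 2) := by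
    rw [List.drop_eq_getElem_cons hj1, hxj]
  have htake : s.take (j + 2) = s.take (j + 1) ++ [x] := by
    rw [List.take_add_one, hxq]
    rfl
  rw [aLoop, dif_pos hj, dif_pos hj1, hdrop]
  simp only [altGo, hpj, hxj]
  by_cases hgt : x - p > 1
  · have hcb : check_number_bigger_by_1 p x = true := by
      unfold check_number_bigger_by_1
      simp only [ite_eq_right_iff]
      omega
    rw [if_pos hcb, if_pos hgt]
    have hfe : (x - (p + 1)).toNat = (x - p - 1).toNat := by omega
    have hseq := scan_eq r2 (s.take (j + 1)) h2 p (x - p - 1).toNat 1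
    rw [hseq, hfe]
    cases hscan : altScanGo r2 (x - p - 1).toNat (p + 1) with
    | some m' => simp
    | none =>
      have hAnone : aScanGo p (s.take (j + 1)) (x - p - 1).toNat 1 = none := by
        rw [hseq, hscan]
      have hinv := step_inv r1 r2 (s.take (j + 1)) x h1 h2
      have hi' : j + 1 ≤ i := by
        rcases Nat.lt_or_ge j i with h' | h'
        · omega
        · -- then i = j; the hit's missing m would have been found by the scan: contradiction
          exfalso
          have hij : i = j := by omega
          subst hij
          have hb := PySem.List.mem_pyRange_one.mp hm
          have hchk := aScan_none p (s.take (i + 1)) _ _ hAnone (m - p)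
            (by omega) (by omega)
          rw [show p + (m - p) = m by ring] at hchk
          obtain ⟨c, hcsub, hclen, hcsum⟩ := (check_iff m (s.take (i + 1))).mp hchk
          exact hmiss c (List.mem_sublists.mpr hcsub) hclen hcsum
      have hih := ihn (n - 1) (by omega) s (j + 1) (altStep r1 r2 x).1 (altStep r1 r2 x).2
        (by omega) hj1 (htake ▸ hinv.1) (htake ▸ hinv.2)
        ⟨i, hi', hi1, hgap, m, hm, hmiss⟩
      rw [hih]
  · have hcb : check_number_bigger_by_1 p x = false := by
      unfold check_number_bigger_by_1
      simp only [ite_eq_left_iff]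
      omega
    rw [if_neg (by simp [hcb]), if_neg hgt]
    have hinv := step_inv r1 r2 (s.take (j + 1)) x h1 h2
    have hi' : j + 1 ≤ i := by
      rcases Nat.lt_or_ge j i with h' | h'
      · omega
      · exfalso
        have hij : i = j := by omega
        subst hij
        omega
    have hih := ihn (n - 1) (by omega) s (j + 1) (altStep r1 r2 x).1 (altStep r1 r2 x).2
      (by omega) hj1 (htake ▸ hinv.1) (htake ▸ hinv.2)
      ⟨i, hi', hi1, hgap, m, hm, hmiss⟩
    rw [hih]

theorem mem_gapSums (s : List Int) (i : Nat) (m : Int) :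
    m ∈ gapSums s i ↔ ∃ c : List Int, c.Sublist (s.take (i + 1)) ∧ 2 ≤ c.length ∧ c.sum = m := by
  unfold gapSums
  simp only [PySem.Set.mem_ofList, List.mem_map, List.mem_filter, List.mem_sublists,
    decide_eq_true_eq]
  constructor
  · rintro ⟨c, ⟨hsub, hlen⟩, hsum⟩
    exact ⟨c, hsub, hlen, hsum⟩
  · rintro ⟨c, hsub, hlen, hsum⟩
    exact ⟨c, ⟨hsub, hlen⟩, hsum⟩

theorem count_lt_iff_missing (S : List Int) (hnd : S.Nodup) (lo hi : Int) (h : lo + 1 < hi) :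
    (((S.filter (fun v => decide (lo < v ∧ v < hi))).length : Int) < hi - lo - 1 ↔
      ∃ m ∈ PySem.List.pyRange (lo + 1) hi 1, m ∉ S) := by
  set T := S.filter (fun v => decide (lo < v ∧ v < hi)) with hT
  set R := PySem.List.pyRange (lo + 1) hi 1 with hR
  have hTnd : T.Nodup := hnd.filter _
  have hRnd : R.Nodup := PySem.List.nodup_pyRange_one _ _
  have hmemT : ∀ v, v ∈ T ↔ v ∈ S ∧ lo < v ∧ v < hi := by
    intro v
    simp [hT, List.mem_filter]
  have hmemR : ∀ v, v ∈ R ↔ lo + 1 ≤ v ∧ v < hi := fun v => PySem.List.mem_pyRange_one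
  have hRlen : (R.length : Int) = hi - lo - 1 := by
    rw [hR, PySem.List.length_pyRange_one]
    omega
  have hTR : T ⊆ R := by
    intro v hv
    rw [hmemR]
    have := (hmemT v).mp hv
    omega
  constructor
  · intro hlt
    by_contra hno
    push Not at hno
    have hRT : R ⊆ T := by
      intro v hv
      have hb := (hmemR v).mp hv
      exact (hmemT v).mpr ⟨hno v hv, by omega, hb.2⟩
    have hsub : R.toFinset ⊆ T.toFinset := by
      intro v hv
      rw [List.mem_toFinset] at *
      exact hRT hv
    have hcard := Finset.card_le_card hsub
    rw [List.toFinset_card_of_nodup hRnd, List.toFinset_card_of_nodup hTnd] at hcard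
    omega
  · rintro ⟨m, hmR, hmS⟩
    have hmT : m ∉ T := fun hmt => hmS ((hmemT m).mp hmt).1
    have hsub : T.toFinset ⊆ R.toFinset.erase m := by
      intro v hv
      rw [List.mem_toFinset] at hv
      rw [Finset.mem_erase, List.mem_toFinset]
      exact ⟨fun he => hmT (he ▸ hv), hTR hv⟩
    have hcard := Finset.card_le_card hsub
    rw [Finset.card_erase_of_mem (List.mem_toFinset.mpr hmR),
      List.toFinset_card_of_nodup hRnd, List.toFinset_card_of_nodup hTnd] at hcard
    have hRpos : 0 < R.length := List.length_pos_of_mem hmR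
    omega

-- a counted gap deficit yields a concrete missing value in the HitFrom form
theorem deficit_to_hit (s : List Int) (i : Nat) (hi1 : i + 1 < s.length)
    (hgap : s.getD i 0 + 1 < s.getD (i + 1) 0)
    (hcnt : (((gapSums s i).filter
        (fun v => decide (s.getD i 0 < v ∧ v < s.getD (i + 1) 0))).length : Int) <
      s.getD (i + 1) 0 - s.getD i 0 - 1) (j : Nat) (hj : j ≤ i) :
    HitFrom s j := by
  obtain ⟨m, hm, hnot⟩ := (count_lt_iff_missing (gapSums s i)
    (by unfold gapSums; exact PySem.Set.nodup_ofList _)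
    (s.getD i 0) (s.getD (i + 1) 0) hgap).mp hcnt
  refine ⟨i, hj, hi1, hgap, m, hm, ?_⟩
  intro c hc hlen hsum
  exact hnot ((mem_gapSums s i m).mpr ⟨c, List.mem_sublists.mp hc, hlen, hsum⟩)

theorem inv1_singleton (x : Int) : Inv1 [x] [x] := by
  intro v
  simp only [List.mem_singleton]
  constructor
  · intro h
    exact ⟨[x], List.Sublist.refl _, by simp, by simp [h]⟩
  · rintro ⟨c, hc, hne, hs⟩
    rcases List.sublist_singleton.mp hc with rfl | rfl
    · exact absurd rfl hne
    · simpa using hs.symm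

theorem inv2_singleton (x : Int) : Inv2 [] [x] := by
  intro v
  constructor
  · intro h
    simp at h
  · rintro ⟨c, hc, hlen, _⟩
    have := hc.length_le
    simp at this
    omega

-- ===== VERDICT (by name: the statement is the Claim_ definition above) =====
theorem find_least_number_missing_spec : Claim_equal_find_least_number_missing := by
  intro input_list _ hpre
  unfold Spec_find_least_number_missing
  unfold find_least_number_missing find_least_number_missing_alt
  unfold Pre_find_least_number_missing at hpre
  rcases hpre with rfl | hex
  · have hnil : PySem.List.sorted ([] : List Int) (fun x => x) false = [] := rfl
    rw [hnil, aLoop]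
    simp [altGo]
  · obtain ⟨i, _, hi1, hgap, hcnt⟩ := hex
    have hhit := deficit_to_hit _ i hi1 hgap hcnt 0 (Nat.zero_le i)
    cases hs : PySem.List.sorted input_list (fun x => x) false with
    | nil =>
      rw [hs] at hi1
      simp at hi1
    | cons x0 rest =>
      rw [hs] at hhit
      have hstep : altStep PySem.Set.empty PySem.Set.empty x0 = ([x0], ([] : List Int)) := rfl
      have hB : altGo PySem.Set.empty PySem.Set.empty none (x0 :: rest) =
          altGo [x0] [] (some x0) rest := by
        simp only [altGo, hstep]
      rw [hB]
      have := loop_eq (x0 :: rest).length (x0 :: rest) 0 [x0] []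
        rfl (by simp) (inv1_singleton x0) (inv2_singleton x0) hhit
      simpa using this

theorem find_least_number_missing_raises : Claim_raises_find_least_number_missing := by
  unfold Claim_raises_find_least_number_missing
  constructor
  · intro l _ hr hpre
    obtain ⟨hne, hno⟩ := hr
    rcases hpre with rfl | hex
    · exact hne rfl
    · exact hno hex
  · exact ⟨by decide, by decide, by decide⟩

-- self-check: the stated raise-region witness really lies inside Raises_
theorem raises_witness_ok :
    Raises_find_least_number_missing pvRaiseWitness_find_least_number_missing :=
  find_least_number_missing_raises.2.2.1
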